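-- pv_equiv track=rewrite | github.com/lemessaA/Nutrition-coach-agent | backend/agents/market_intelligence_agent.py | _suggest_seasonal_recipes
-- ===== SOURCE A (Python) =====
-- from typing import Any, Dict, List, Optional
--
-- def _suggest_seasonal_recipes(
--     produce: List[Dict[str, Any]], season: str
-- ) -> List[str]:
--     names = {p["name"] for p in produce}
--     recipes: List[str] = []
--     if {"tomatoes", "corn"} & names == {"tomatoes", "corn"}:
--         recipes.append("Summer vegetable salad with grilled corn")
--     if "pumpkin" in names:
--         recipes.append("Roasted pumpkin soup")
--     if {"apples", "brussels sprouts"} & names == {"apples", "brussels sprouts"}: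
--         recipes.append("Apple Brussels sprouts slaw")
--     if "kale" in names:
--         recipes.append("Winter kale and citrus salad")
--     return recipes[:3]
-- ===== SOURCE B (Python) =====
-- # Inverted index: each trigger produce name points to its rule bucket; one counting
-- # pass over produce tallies distinct matched ingredients per rule, and a rule fires
-- # when its counter reaches the required number of ingredients.
-- _TRIGGER_RULE = {
--     "tomatoes": 0, "corn": 0,
--     "pumpkin": 1,
--     "apples": 2, "brussels sprouts": 2,
--     "kale": 3,
-- }
-- _NEED = [2, 1, 2, 1]
-- _RECIPES = [
--     "Summer vegetable salad with grilled corn",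
--     "Roasted pumpkin soup",
--     "Apple Brussels sprouts slaw",
--     "Winter kale and citrus salad",
-- ]
--
-- def _suggest_seasonal_recipes(produce, season):
--     hits = [0, 0, 0, 0]
--     seen = set()
--     for p in produce:
--         n = p["name"]
--         if n not in seen:
--             seen.add(n)
--             i = _TRIGGER_RULE.get(n)
--             if i is not None:
--                 hits[i] += 1
--     out = []
--     for need, recipe, h in zip(_NEED, _RECIPES, hits):
--         if h == need:
--             out.append(recipe)
--     return out[:3]
-- ===== Notes on version B (the rewrite author's own statement) =====
-- stated objective: alternative
-- what changed: Replaces A's set-construction plus four intersection/membership tests with an inverted index (trigger ingredient -> rule bucket) and a single counting pass over produce that tallies distinct matched ingredients per rule and emits a recipe when its counter equals the rule's requirement.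
import Mathlib
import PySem

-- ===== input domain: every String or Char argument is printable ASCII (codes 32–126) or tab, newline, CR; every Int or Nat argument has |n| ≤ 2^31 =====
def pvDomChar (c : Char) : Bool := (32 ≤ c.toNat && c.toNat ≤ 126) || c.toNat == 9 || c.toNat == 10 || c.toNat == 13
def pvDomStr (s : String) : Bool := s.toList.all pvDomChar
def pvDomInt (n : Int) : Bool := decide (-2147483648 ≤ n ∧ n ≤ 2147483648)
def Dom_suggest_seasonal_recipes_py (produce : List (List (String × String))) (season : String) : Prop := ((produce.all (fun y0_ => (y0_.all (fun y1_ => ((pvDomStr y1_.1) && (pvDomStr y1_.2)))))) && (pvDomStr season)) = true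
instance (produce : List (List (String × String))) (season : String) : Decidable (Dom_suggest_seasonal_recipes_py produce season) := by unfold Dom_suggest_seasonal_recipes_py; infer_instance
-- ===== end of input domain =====

-- B replaces A's set intersection/membership tests with an inverted trigger->rule index and one
-- counting pass over produce (objective: alternative; same cost).

-- ===== PORT A =====
-- p["name"] (KeyError excluded by Pre_; under Pre_ the default is never used)
def pvName (p : List (String × String)) : String := PySem.Dict.getD (PySem.Dict.mk p) "name" ""

def suggest_seasonal_recipes_py (produce : List (List (String × String))) (season : String) : List String :=
  -- names = {p["name"] for p in produce}
  let names : PySem.Set String :=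
    produce.foldl (fun s p => PySem.Set.add s (pvName p)) PySem.Set.empty
  let recipes : List String := []
  let recipes := if PySem.Set.equal (PySem.Set.inter (PySem.Set.ofList ["tomatoes", "corn"]) names)
                      (PySem.Set.ofList ["tomatoes", "corn"])
                 then recipes ++ ["Summer vegetable salad with grilled corn"] else recipes
  let recipes := if PySem.Set.contains names "pumpkin"
                 then recipes ++ ["Roasted pumpkin soup"] else recipes
  let recipes := if PySem.Set.equal (PySem.Set.inter (PySem.Set.ofList ["apples", "brussels sprouts"]) names)
                      (PySem.Set.ofList ["apples", "brussels sprouts"])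
                 then recipes ++ ["Apple Brussels sprouts slaw"] else recipes
  let recipes := if PySem.Set.contains names "kale"
                 then recipes ++ ["Winter kale and citrus salad"] else recipes
  PySem.List.slice recipes none (some 3)

-- ===== PORT B =====
def pvTriggerRule : PySem.Dict String Nat :=
  PySem.Dict.mk [("tomatoes", 0), ("corn", 0), ("pumpkin", 1),
                 ("apples", 2), ("brussels sprouts", 2), ("kale", 3)]
def pvNeed : List Int := [2, 1, 2, 1]
def pvRecipes : List String :=
  ["Summer vegetable salad with grilled corn", "Roasted pumpkin soup",
   "Apple Brussels sprouts slaw", "Winter kale and citrus salad"]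

-- the body of B's counting loop
def pvStep (st : List Int × PySem.Set String) (p : List (String × String)) :
    List Int × PySem.Set String :=
  let n := pvName p
  if PySem.Set.contains st.2 n then st
  else
    let seen := PySem.Set.add st.2 n
    match PySem.Dict.get? pvTriggerRule n with
    | some i => (st.1.set i (st.1.getD i 0 + 1), seen)
    | none => (st.1, seen)

def suggest_seasonal_recipes_py_alt (produce : List (List (String × String))) (season : String) : List String :=
  let st := produce.foldl pvStep ([0, 0, 0, 0], PySem.Set.empty)
  let out := (pvNeed.zip (pvRecipes.zip st.1)).foldl
      (fun out x => if x.2.2 = x.1 then out ++ [x.2.1] else out) []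
  PySem.List.slice out none (some 3)

-- ===== PRECONDITION & SPEC =====
-- Pre_ excludes exactly the inputs on which A (and B) raise KeyError: a produce dict without key "name".
def Pre_suggest_seasonal_recipes_py (produce : List (List (String × String))) (season : String) : Prop :=
  ∀ p ∈ produce, "name" ∈ p.map Prod.fst
instance (produce : List (List (String × String))) (season : String) : Decidable (Pre_suggest_seasonal_recipes_py produce season) := by unfold Pre_suggest_seasonal_recipes_py; infer_instance

def pvWitness_suggest_seasonal_recipes_py : (List (List (String × String))) × String :=
  ([[("name", "kale")], [("name", "pumpkin"), ("color", "orange")]], "fall")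

def Spec_suggest_seasonal_recipes_py (produce : List (List (String × String))) (season : String) (out : List String) : Prop := out = suggest_seasonal_recipes_py_alt produce season
instance (produce : List (List (String × String))) (season : String) (out : List String) : Decidable (Spec_suggest_seasonal_recipes_py produce season out) := by unfold Spec_suggest_seasonal_recipes_py; infer_instance

-- ===== CLAIM (what is proved, stated in full; the proofs are below) =====
def Claim_equal_suggest_seasonal_recipes_py : Prop := ∀ (produce : List (List (String × String))) (season : String), Dom_suggest_seasonal_recipes_py produce season → Pre_suggest_seasonal_recipes_py produce season → Spec_suggest_seasonal_recipes_py produce season (suggest_seasonal_recipes_py produce season)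

-- ===== LEMMAS AND PROOFS =====

-- 0/1 membership indicator
def pvB (s : PySem.Set String) (x : String) : Int := if PySem.Set.contains s x then 1 else 0

-- B's hits list as a function of the seen set
def pvH (s : PySem.Set String) : List Int :=
  [pvB s "tomatoes" + pvB s "corn", pvB s "pumpkin",
   pvB s "apples" + pvB s "brussels sprouts", pvB s "kale"]

lemma pvB_add_self (s : PySem.Set String) (n : String) (h : ¬ n ∈ s) :
    pvB (PySem.Set.add s n) n = 1 := by
  simp [pvB, PySem.Set.contains_eq_listContains, PySem.Set.mem_add]

lemma pvB_add_ne (s : PySem.Set String) (n x : String) (h : x ≠ n) :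
    pvB (PySem.Set.add s n) x = pvB s x := by
  simp [pvB, PySem.Set.contains_eq_listContains, PySem.Set.mem_add, h]

lemma pvB_of_not_mem (s : PySem.Set String) (x : String) (h : ¬ x ∈ s) : pvB s x = 0 := by
  simp [pvB, PySem.Set.contains_eq_listContains, h]

-- one step of B's loop preserves the invariant hits = pvH seen
lemma pvStep_H (s : PySem.Set String) (p : List (String × String)) :
    pvStep (pvH s, s) p = (pvH (PySem.Set.add s (pvName p)), PySem.Set.add s (pvName p)) := by
  unfold pvStep
  generalize pvName p = n
  by_cases hmem : n ∈ s
  · simp [PySem.Set.contains_eq_listContains, hmem]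
  · simp only [PySem.Set.contains_eq_listContains, List.contains_eq_mem, hmem, decide_false]
    by_cases h1 : n = "tomatoes"
    · subst h1
      simp [pvTriggerRule, PySem.Dict.get?, pvH, List.getD,
            pvB_add_self s _ hmem, pvB_add_ne, pvB_of_not_mem s _ hmem] <;> omega
    · by_cases h2 : n = "corn"
      · subst h2
        simp [pvTriggerRule, PySem.Dict.get?, pvH, List.getD,
            pvB_add_self s _ hmem, pvB_add_ne, pvB_of_not_mem s _ hmem] <;> omega
      · by_cases h3 : n = "pumpkin"
        · subst h3
          simp [pvTriggerRule, PySem.Dict.get?, pvH, List.getD,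
            pvB_add_self s _ hmem, pvB_add_ne, pvB_of_not_mem s _ hmem] <;> omega
        · by_cases h4 : n = "apples"
          · subst h4
            simp [pvTriggerRule, PySem.Dict.get?, pvH, List.getD,
            pvB_add_self s _ hmem, pvB_add_ne, pvB_of_not_mem s _ hmem] <;> omega
          · by_cases h5 : n = "brussels sprouts"
            · subst h5
              simp [pvTriggerRule, PySem.Dict.get?, pvH, List.getD,
            pvB_add_self s _ hmem, pvB_add_ne, pvB_of_not_mem s _ hmem] <;> omega
            · by_cases h6 : n = "kale"
              · subst h6
                simp [pvTriggerRule, PySem.Dict.get?, pvH, List.getD,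
            pvB_add_self s _ hmem, pvB_add_ne, pvB_of_not_mem s _ hmem] <;> omega
              · have hget : PySem.Dict.get? pvTriggerRule n = none := by
                  simp [pvTriggerRule, PySem.Dict.get?]
                  exact ⟨fun h => h1 h.symm, fun h => h2 h.symm, fun h => h3 h.symm,
                    fun h => h4 h.symm, fun h => h5 h.symm, fun h => h6 h.symm⟩
                simp only [hget]
                have : pvH (PySem.Set.add s n) = pvH s := by
                  simp [pvH, pvB_add_ne s n _ (fun h => h1 h.symm),
                    pvB_add_ne s n _ (fun h => h2 h.symm), pvB_add_ne s n _ (fun h => h3 h.symm),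
                    pvB_add_ne s n _ (fun h => h4 h.symm), pvB_add_ne s n _ (fun h => h5 h.symm),
                    pvB_add_ne s n _ (fun h => h6 h.symm)]
                simp [this]

-- the whole counting loop: hits = pvH of the names set
lemma pvFold_H (l : List (List (String × String))) (s : PySem.Set String) :
    l.foldl pvStep (pvH s, s)
      = (pvH (l.foldl (fun s p => PySem.Set.add s (pvName p)) s),
         l.foldl (fun s p => PySem.Set.add s (pvName p)) s) := by
  induction l generalizing s with
  | nil => rfl
  | cons p t ih => simp [List.foldl_cons, pvStep_H, ih]

-- A's '{a, b} & names == {a, b}' tests exactly membership of a and b.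
lemma equal_inter_pair (a b : String) (n : List String) :
    PySem.Set.equal (PySem.Set.inter (PySem.Set.ofList [a, b]) n) (PySem.Set.ofList [a, b])
      = (decide (a ∈ n) && decide (b ∈ n)) := by
  rw [Bool.eq_iff_iff]
  simp only [PySem.Set.equal_iff, PySem.Set.mem_inter, PySem.Set.mem_ofList,
    Bool.and_eq_true, decide_eq_true_eq]
  constructor
  · intro h
    exact ⟨(((h a).mpr (by simp)).2), (((h b).mpr (by simp)).2)⟩
  · intro h x
    constructor
    · exact fun hx => hx.1
    · intro hx
      refine ⟨hx, ?_⟩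
      rcases (by simpa using hx : x = a ∨ x = b) with rfl | rfl
      · exact h.1
      · exact h.2

-- ===== VERDICT (by name: the statement is the Claim_ definition above) =====
theorem suggest_seasonal_recipes_py_spec : Claim_equal_suggest_seasonal_recipes_py := by
  intro produce season _ _
  unfold Spec_suggest_seasonal_recipes_py suggest_seasonal_recipes_py suggest_seasonal_recipes_py_alt
  have h0 : pvH PySem.Set.empty = [0, 0, 0, 0] := by decide
  rw [← h0, pvFold_H]
  set n := produce.foldl (fun s p => PySem.Set.add s (pvName p)) PySem.Set.empty with hn
  by_cases h1 : "tomatoes" ∈ n <;> by_cases h2 : "corn" ∈ n <;>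
  by_cases h3 : "pumpkin" ∈ n <;> by_cases h4 : "apples" ∈ n <;>
  by_cases h5 : "brussels sprouts" ∈ n <;> by_cases h6 : "kale" ∈ n <;>
    simp [pvNeed, pvRecipes, pvH, pvB, equal_inter_pair,
      PySem.Set.contains_eq_listContains, h1, h2, h3, h4, h5, h6]
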